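-- pv_equiv track=rewrite | github.com/cmathez/Datathon-Marmiton | DataProcessing.py | ingredients_clean
-- ===== SOURCE A (Python) =====
-- def max_len(l):
--   compteur = 0
--   result = ""
--   for item in l:
--     if len(item) > compteur:
--       compteur = len(item)
--       result = item
--   return result
--
-- def ingredients_clean(x,total_ingredients_ ):
--   ing_to_delete = ["poivre", "sel", "oeuf", "beurre", "huile", "sucre",
--                  "farine", "persil", "ciboulette", "échalotte", "oignon"
--                  ]
--   x = x.split(",")
--   l = ""
--   for i in range(len(x)):
--     total = []
--     for ing in total_ingredients_:
--       if ing in x[i]: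
--           total.append(ing)
--     x[i] = max_len(total)
--     for value in ing_to_delete:
--       if value in x[i]:
--         x[i] =""
--     if x[i] != "":
--       if i != len(x)-1:
--         l += (x[i]+",").strip()
--       else:
--         l += x[i].strip()
--   if len(l) != 0:
--     if l[-1] == ",":
--       return l[:-1]
--   return l.strip()
-- ===== SOURCE B (Python) =====
-- def ingredients_clean(x, total_ingredients_):
--     ing_to_delete = ["poivre", "sel", "oeuf", "beurre", "huile", "sucre",
--                      "farine", "persil", "ciboulette", "échalotte", "oignon"]
--     # sort the patterns once, longest first (stable: original order breaks ties),
--     # so the first substring hit per part is exactly the longest match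
--     patterns = sorted(total_ingredients_, key=len, reverse=True)
--     parts = x.split(",")
--     n = len(parts)
--     pieces = []
--     for i, part in enumerate(parts):
--         m = next((p for p in patterns if p in part), "")
--         if m == "" or any(d in m for d in ing_to_delete):
--             continue
--         pieces.append(m.lstrip() + "," if i != n - 1 else m.strip())
--     l = "".join(pieces)
--     if l.endswith(","):
--         return l[:-1]
--     return l.strip()
-- ===== Notes on version B (the rewrite author's own statement) =====
-- stated objective: faster
-- what changed: A rescans every pattern per comma-part and keeps a running longest match, then rebuilds the string with per-index comma logic; B sorts the patterns once by length (descending, stable) so the per-part scan can stop at the very first substring hit (which is exactly A's longest match), collects kept pieces in a list and joins them once.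
import Mathlib
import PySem

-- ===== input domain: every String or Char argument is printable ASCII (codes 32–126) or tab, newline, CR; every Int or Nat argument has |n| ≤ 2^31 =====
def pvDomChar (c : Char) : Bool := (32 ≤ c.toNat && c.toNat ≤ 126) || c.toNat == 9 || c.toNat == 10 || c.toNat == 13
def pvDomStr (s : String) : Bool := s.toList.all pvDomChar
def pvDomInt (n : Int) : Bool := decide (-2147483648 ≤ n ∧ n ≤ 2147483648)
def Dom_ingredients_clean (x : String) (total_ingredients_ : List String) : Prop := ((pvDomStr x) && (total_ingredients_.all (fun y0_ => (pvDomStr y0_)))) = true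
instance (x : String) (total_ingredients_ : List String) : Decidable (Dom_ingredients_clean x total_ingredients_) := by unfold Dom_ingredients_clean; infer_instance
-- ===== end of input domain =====

-- B replaces A's per-part full scan + running-longest pass by sorting the patterns once
-- (longest first, stable) and taking the first substring hit per part; same return value.

-- shared literal constant (data only)
def pvIngToDelete : List String :=
  ["poivre", "sel", "oeuf", "beurre", "huile", "sucre",
   "farine", "persil", "ciboulette", "échalotte", "oignon"]

-- ===== PORT A =====
-- Python max_len: running (compteur, result) pair, strict '>' keeps the first longest
def pvMaxLen (l : List String) : String :=
  (l.foldl (fun st item => if PySem.Str.len item > st.1 then (PySem.Str.len item, item) else st)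
    ((0 : Int), "")).2

-- one iteration of A's `for i in range(len(x))` body (part = x[i])
def pvStepA (ti : List String) (n : Nat) (part : List Char) (l : List Char) (i : Nat) : List Char :=
  let total := ti.foldl (fun t ing => if PySem.Chars.isIn ing.toList part then t ++ [ing] else t) []
  let xi := pvMaxLen total
  let xi2 := pvIngToDelete.foldl (fun xi v => if PySem.Chars.isIn v.toList xi.toList then "" else xi) xi
  if xi2 ≠ "" then
    if i ≠ n - 1 then l ++ PySem.Chars.strip (xi2.toList ++ [','])
    else l ++ PySem.Chars.strip xi2.toList
  else l

def ingredients_clean (x : String) (total_ingredients_ : List String) : String :=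
  let xs := PySem.Chars.splitOn x.toList [',']
  let n := xs.length
  let l := (List.range n).foldl (fun l i => pvStepA total_ingredients_ n (xs.getD i []) l i) []
  if l.length ≠ 0 then
    if PySem.List.pyGet? l (-1) = some ',' then String.ofList (PySem.Chars.slice l none (some (-1)))
    else String.ofList (PySem.Chars.strip l)
  else String.ofList (PySem.Chars.strip l)

-- ===== PORT B =====
-- next((p for p in patterns if p in part), "")
def pvFirstMatch (patterns : List String) (part : List Char) : String :=
  (patterns.find? (fun p => PySem.Chars.isIn p.toList part)).getD ""

-- one iteration of B's loop over enumerate(parts); appends at most one piece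
def pvStepB (patterns : List String) (n : Nat) (ps : List (List Char)) (ip : Int × List Char) :
    List (List Char) :=
  let m := pvFirstMatch patterns ip.2
  if m = "" ∨ pvIngToDelete.any (fun d => PySem.Chars.isIn d.toList m.toList) then ps
  else ps ++ [if ip.1 ≠ (n : Int) - 1 then PySem.Chars.lstrip m.toList ++ [','] else PySem.Chars.strip m.toList]

def ingredients_clean_alt (x : String) (total_ingredients_ : List String) : String :=
  let patterns := PySem.List.sorted total_ingredients_ (fun s => PySem.Str.len s) true
  let parts := PySem.Chars.splitOn x.toList [',']
  let n := parts.length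
  let pieces := (PySem.List.enumerate parts).foldl (pvStepB patterns n) []
  let l := PySem.Chars.join [] pieces
  if PySem.Chars.endswith l [','] then String.ofList (PySem.Chars.slice l none (some (-1)))
  else String.ofList (PySem.Chars.strip l)

-- ===== PRECONDITION & SPEC =====
def Spec_ingredients_clean (x : String) (total_ingredients_ : List String) (out : String) : Prop := out = ingredients_clean_alt x total_ingredients_
instance (x : String) (total_ingredients_ : List String) (out : String) : Decidable (Spec_ingredients_clean x total_ingredients_ out) := by unfold Spec_ingredients_clean; infer_instance

-- ===== CLAIM (what is proved, stated in full; the proofs are below) =====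
def Claim_equal_ingredients_clean : Prop := ∀ (x : String) (total_ingredients_ : List String), Dom_ingredients_clean x total_ingredients_ → Spec_ingredients_clean x total_ingredients_ (ingredients_clean x total_ingredients_)

-- ===== LEMMAS AND PROOFS =====

-- abbreviations for the proofs
def pvBef (a b : String) : Bool := decide (PySem.Str.len b < PySem.Str.len a)

def pvIns (a : List String) (x : String) : List String := PySem.List.insertBy pvBef x a

-- head of an insertion is A's running-longest update
theorem pv_head_insertBy (x : String) (acc : List String) :
    (pvIns acc x).headD "" =
    if (acc.headD "").length < x.length then x else acc.headD "" := by
  cases acc with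
  | nil =>
    by_cases h : (([] : List String).headD "").length < x.length
    · simp [pvIns, PySem.List.insertBy]
    · have h0 : ((([] : List String).headD "")).length = 0 := by decide
      have hx : x = "" := String.length_eq_zero_iff.mp (by omega)
      simp [pvIns, PySem.List.insertBy, hx]
  | cons y ys =>
    by_cases h : y.length < x.length
    · simp [pvIns, PySem.List.insertBy, pvBef, PySem.Str.len, h]
    · simp [pvIns, PySem.List.insertBy, pvBef, PySem.Str.len, h]

-- insertion sort's head computes A's max_len loop
theorem pv_foldl_ins_head (F : List String) : ∀ acc : List String,
    (F.foldl pvIns acc).headD "" =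
    (F.foldl (fun st item => if PySem.Str.len item > st.1 then (PySem.Str.len item, item) else st)
      (PySem.Str.len (acc.headD ""), acc.headD "")).2 := by
  induction F with
  | nil => intro acc; rfl
  | cons x F ih =>
    intro acc
    simp only [List.foldl_cons]
    rw [ih (pvIns acc x)]
    congr 1
    rw [pv_head_insertBy]
    have hl : ∀ s : String, PySem.Str.len s = (s.length : Int) := fun s => by
      simp [PySem.Str.len]
    by_cases hlt : (acc.headD "").length < x.length
    · rw [if_pos hlt]
      have hlt' : PySem.Str.len (acc.headD "") < PySem.Str.len x := by
        rw [hl, hl]; exact_mod_cast hlt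
      simp only [gt_iff_lt, hlt', if_true]
    · rw [if_neg hlt]
      have hlt' : ¬ PySem.Str.len (acc.headD "") < PySem.Str.len x := by
        rw [hl, hl]; exact_mod_cast hlt
      simp only [gt_iff_lt, hlt', if_false]

theorem pv_maxLen_eq_sorted_head (F : List String) :
    pvMaxLen F = ((PySem.List.sorted F (fun s => PySem.Str.len s) true).headD "") := by
  rw [PySem.List.sorted_rev_eq_foldl_insertBy]
  have hfun : (fun (acc : List String) (x : String) =>
      PySem.List.insertBy (fun a b => decide (PySem.Str.len b < PySem.Str.len a)) x acc) = pvIns := by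
    funext acc x; rfl
  rw [hfun, pv_foldl_ins_head]
  simp [pvMaxLen]

theorem pv_pairwise_insertBy (x : String) (ys : List String)
    (h : ys.Pairwise (fun a b => b.length ≤ a.length)) :
    (pvIns ys x).Pairwise (fun a b => b.length ≤ a.length) := by
  induction ys with
  | nil => simp [pvIns, PySem.List.insertBy]
  | cons y ys ih =>
    rw [List.pairwise_cons] at h
    obtain ⟨h1, h2⟩ := h
    by_cases hb : y.length < x.length
    · rw [show pvIns (y :: ys) x = x :: y :: ys by
        simp [pvIns, PySem.List.insertBy, pvBef, PySem.Str.len, hb]]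
      rw [List.pairwise_cons]
      refine ⟨?_, by rw [List.pairwise_cons]; exact ⟨h1, h2⟩⟩
      intro z hz
      rcases List.mem_cons.mp hz with rfl | hz'
      · exact le_of_lt hb
      · exact le_trans (h1 z hz') (le_of_lt hb)
    · rw [show pvIns (y :: ys) x = y :: pvIns ys x by
        simp [pvIns, PySem.List.insertBy, pvBef, PySem.Str.len, hb]]
      rw [List.pairwise_cons]
      refine ⟨?_, ih h2⟩
      intro z hz
      rcases (PySem.List.mem_insertBy pvBef x z ys).mp hz with rfl | hz'
      · omega
      · exact h1 z hz'

-- inserting an element longer than everything puts it at the head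
theorem pv_ins_head (x : String) (zs : List String)
    (h : ∀ z ∈ zs, z.length < x.length) : pvIns zs x = x :: zs := by
  cases zs with
  | nil => simp [pvIns, PySem.List.insertBy]
  | cons z zs =>
    simp [pvIns, PySem.List.insertBy, pvBef, PySem.Str.len, h z (by simp)]

theorem pv_filter_insertBy (p : String → Bool) (x : String) (ys : List String)
    (h : ys.Pairwise (fun a b => b.length ≤ a.length)) :
    (pvIns ys x).filter p = if p x then pvIns (ys.filter p) x else ys.filter p := by
  induction ys with
  | nil =>
    by_cases hx : p x <;> simp [pvIns, PySem.List.insertBy, List.filter, hx]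
  | cons y ys ih =>
    rw [List.pairwise_cons] at h
    obtain ⟨h1, h2⟩ := h
    by_cases hb : y.length < x.length
    · have hall : ∀ z ∈ (y :: ys).filter p, z.length < x.length := by
        intro z hz
        have hz' := List.mem_of_mem_filter hz
        rcases List.mem_cons.mp hz' with rfl | hz''
        · exact hb
        · exact lt_of_le_of_lt (h1 z hz'') hb
      rw [show pvIns (y :: ys) x = x :: y :: ys by
        simp [pvIns, PySem.List.insertBy, pvBef, PySem.Str.len, hb]]
      rw [pv_ins_head x _ hall]
      by_cases hx : p x <;> simp [List.filter_cons, hx]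
    · have hyx : pvIns (y :: ys) x = y :: pvIns ys x := by
        simp [pvIns, PySem.List.insertBy, pvBef, PySem.Str.len, hb]
      have hins : pvIns (y :: ys.filter p) x = y :: pvIns (ys.filter p) x := by
        simp [pvIns, PySem.List.insertBy, pvBef, PySem.Str.len, hb]
      rw [hyx]
      by_cases hy : p y <;> by_cases hx : p x <;>
        simp [hy, hx, ih h2, hins]

theorem pv_filter_foldl_ins (p : String → Bool) (F : List String) : ∀ acc : List String,
    acc.Pairwise (fun a b => b.length ≤ a.length) →
    (F.foldl pvIns acc).filter p = (F.filter p).foldl pvIns (acc.filter p) := by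
  induction F with
  | nil => intro acc _; simp
  | cons x F ih =>
    intro acc h
    simp only [List.foldl_cons, List.filter_cons]
    rw [ih (pvIns acc x) (pv_pairwise_insertBy x acc h)]
    rw [pv_filter_insertBy p x acc h]
    by_cases hx : p x <;> simp [hx]

-- a stable sort commutes with filtering
theorem pv_sorted_filter (p : String → Bool) (ti : List String) :
    (PySem.List.sorted ti (fun s => PySem.Str.len s) true).filter p =
    PySem.List.sorted (ti.filter p) (fun s => PySem.Str.len s) true := by
  rw [PySem.List.sorted_rev_eq_foldl_insertBy, PySem.List.sorted_rev_eq_foldl_insertBy]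
  have hfun : (fun (acc : List String) (x : String) =>
      PySem.List.insertBy (fun a b => decide (PySem.Str.len b < PySem.Str.len a)) x acc) = pvIns := by
    funext acc x; rfl
  simp only [hfun]
  simpa using pv_filter_foldl_ins p ti [] List.Pairwise.nil

-- the first hit in the sorted pattern list is A's longest match
theorem pv_firstMatch_eq_maxLen (ti : List String) (part : List Char) :
    pvFirstMatch (PySem.List.sorted ti (fun s => PySem.Str.len s) true) part =
    pvMaxLen (ti.filter (fun ing => PySem.Chars.isIn ing.toList part)) := by
  unfold pvFirstMatch
  rw [← List.head?_filter, pv_sorted_filter, pv_maxLen_eq_sorted_head]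
  rw [List.headD_eq_head?_getD]

theorem pv_delete_empty (ds : List String) :
    ds.foldl (fun xi v => if PySem.Chars.isIn v.toList xi.toList then "" else xi) "" = "" := by
  induction ds with
  | nil => rfl
  | cons d ds ih => simp only [List.foldl_cons, ite_self]; exact ih

-- A's delete loop is an 'any' test
theorem pv_delete_foldl (ds : List String) (xi : String) :
    ds.foldl (fun xi v => if PySem.Chars.isIn v.toList xi.toList then "" else xi) xi =
    if ds.any (fun d => PySem.Chars.isIn d.toList xi.toList) then "" else xi := by
  induction ds generalizing xi with
  | nil => simp
  | cons d ds ih =>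
    simp only [List.foldl_cons, List.any_cons]
    by_cases hd : PySem.Chars.isIn d.toList xi.toList
    · simp [hd, pv_delete_empty]
    · simp [hd, ih]

theorem pv_rstrip_comma (ys : List Char) : PySem.Chars.rstrip (ys ++ [',']) = ys ++ [','] := by
  have h : PySem.Chars.isspace ',' = false := by decide
  simp [PySem.Chars.rstrip, h]

theorem pv_lstrip_comma (cs : List Char) :
    PySem.Chars.lstrip (cs ++ [',']) = PySem.Chars.lstrip cs ++ [','] := by
  have h : PySem.Chars.isspace ',' = false := by decide
  simp only [PySem.Chars.lstrip]
  by_cases he : (List.dropWhile PySem.Chars.isspace cs).isEmpty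
  · rw [List.dropWhile_append, if_pos he, List.isEmpty_iff.mp he]
    simp [h]
  · rw [List.dropWhile_append, if_neg he]

-- (s + ",").strip() = s.lstrip() + ","
theorem pv_strip_comma (cs : List Char) :
    PySem.Chars.strip (cs ++ [',']) = PySem.Chars.lstrip cs ++ [','] := by
  simp only [PySem.Chars.strip]
  rw [pv_lstrip_comma, pv_rstrip_comma]

theorem pv_pyGet_last (t : List Char) (c : Char) :
    PySem.List.pyGet? (t ++ [c]) (-1) = some c := by
  simp [PySem.List.pyGet?, PySem.List.pyIdx?]

-- l.endswith(",") = (len(l) != 0 and l[-1] == ",")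
theorem pv_endswith_comma (l : List Char) :
    PySem.Chars.endswith l [','] = true ↔ (l ≠ [] ∧ PySem.List.pyGet? l (-1) = some ',') := by
  rw [PySem.Chars.endswith_iff]
  constructor
  · rintro ⟨t, rfl⟩
    exact ⟨by simp, pv_pyGet_last t ','⟩
  · rintro ⟨hne, hget⟩
    rcases List.eq_nil_or_concat l with rfl | ⟨t, c, rfl⟩
    · exact absurd rfl hne
    · rw [List.concat_eq_append] at hget ⊢
      rw [pv_pyGet_last] at hget
      obtain rfl : c = ',' := by injection hget
      exact ⟨t, rfl⟩

-- the value A appends at part i (and [] when it appends nothing)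
def pvContrib (ti : List String) (n i : Nat) (part : List Char) : List Char :=
  let total := ti.foldl (fun t ing => if PySem.Chars.isIn ing.toList part then t ++ [ing] else t) []
  let xi := pvMaxLen total
  let xi2 := pvIngToDelete.foldl (fun xi v => if PySem.Chars.isIn v.toList xi.toList then "" else xi) xi
  if xi2 ≠ "" then
    if i ≠ n - 1 then PySem.Chars.strip (xi2.toList ++ [','])
    else PySem.Chars.strip xi2.toList
  else []

theorem pv_stepA_eq (ti : List String) (n : Nat) (part : List Char) (l : List Char) (i : Nat) :
    pvStepA ti n part l i = l ++ pvContrib ti n i part := by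
  simp only [pvStepA, pvContrib]
  split_ifs <;> simp

theorem pv_stepB_eq (patterns : List String) (n : Nat) (ps : List (List Char)) (ip : Int × List Char) :
    pvStepB patterns n ps ip = ps ++
      (let m := pvFirstMatch patterns ip.2
       if m = "" ∨ pvIngToDelete.any (fun d => PySem.Chars.isIn d.toList m.toList) then []
       else [if ip.1 ≠ (n : Int) - 1 then PySem.Chars.lstrip m.toList ++ [','] else PySem.Chars.strip m.toList]) := by
  simp only [pvStepB]
  split_ifs <;> simp

-- per-part agreement: A's contribution equals B's piece (flattened)
theorem pv_contrib_eq (ti : List String) (n i : Nat) (hi : i < n) (part : List Char) :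
    pvContrib ti n i part =
      (let m := pvFirstMatch (PySem.List.sorted ti (fun s => PySem.Str.len s) true) part
       if m = "" ∨ pvIngToDelete.any (fun d => PySem.Chars.isIn d.toList m.toList) then []
       else [if (i : Int) ≠ (n : Int) - 1 then PySem.Chars.lstrip m.toList ++ [','] else PySem.Chars.strip m.toList]).flatten := by
  simp only [pvContrib]
  rw [PySem.List.foldl_append_if_eq_filter, List.nil_append, ← pv_firstMatch_eq_maxLen]
  generalize pvFirstMatch (PySem.List.sorted ti (fun s => PySem.Str.len s) true) part = m
  rw [pv_delete_foldl]
  by_cases ha : pvIngToDelete.any (fun d => PySem.Chars.isIn d.toList m.toList)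
  · simp [ha]
  · by_cases hm0 : m = ""
    · simp [hm0]
    · have hcond : (i ≠ n - 1) ↔ ((i : Int) ≠ (n : Int) - 1) := by omega
      simp only [ha, Bool.false_eq_true, if_false, hm0, ne_eq, not_false_iff, if_true, or_false,
        List.flatten_cons, List.flatten_nil, List.append_nil]
      rw [pv_strip_comma]
      by_cases hlast : i ≠ n - 1
      · rw [if_pos hlast, if_pos (hcond.mp hlast)]
      · rw [if_neg hlast, if_neg (fun hh => hlast (hcond.mpr hh))]

theorem pv_flatten_flatMap {α : Type} (g : α → List (List Char)) (L : List α) :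
    (L.flatMap g).flatten = L.flatMap (fun a => (g a).flatten) := by
  induction L with
  | nil => rfl
  | cons a L ih => simp [List.flatMap_cons, List.flatten_append, ih]

theorem pv_intersperse_nil (ps : List (List Char)) :
    (List.intersperse ([] : List Char) ps).flatten = ps.flatten := by
  induction ps with
  | nil => rfl
  | cons a t ih =>
    cases t with
    | nil => rfl
    | cons b t2 =>
      simp only [List.intersperse_cons₂, List.flatten_cons] at ih ⊢
      simp [ih]

theorem pv_join_nil_eq_flatten (ps : List (List Char)) : PySem.Chars.join [] ps = ps.flatten := by
  have h : PySem.Chars.join [] ps = ([] : List Char).intercalate ps := by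
    simp [PySem.Chars.join]
  rw [h]
  simp only [List.intercalate]
  exact pv_intersperse_nil ps

-- the common tail: A's length/last-char test equals B's endswith test
theorem pv_final (lA lB : List Char) (h : lA = lB) :
    (if lA.length ≠ 0 then
       if PySem.List.pyGet? lA (-1) = some ',' then String.ofList (PySem.Chars.slice lA none (some (-1)))
       else String.ofList (PySem.Chars.strip lA)
     else String.ofList (PySem.Chars.strip lA)) =
    (if PySem.Chars.endswith lB [','] = true then String.ofList (PySem.Chars.slice lB none (some (-1)))
     else String.ofList (PySem.Chars.strip lB)) := by
  subst h
  by_cases h1 : lA = []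
  · subst h1
    have he : PySem.Chars.endswith ([] : List Char) [','] = false := by decide
    simp [he]
  · have hne : lA.length ≠ 0 := fun hh => h1 (List.length_eq_zero_iff.mp hh)
    by_cases h2 : PySem.List.pyGet? lA (-1) = some ','
    · have he : PySem.Chars.endswith lA [','] = true := (pv_endswith_comma lA).mpr ⟨h1, h2⟩
      simp [hne, h2, he]
    · have he : PySem.Chars.endswith lA [','] = false := by
        rw [Bool.eq_false_iff]
        intro hh
        exact h2 ((pv_endswith_comma lA).mp hh).2
      simp [hne, h2, he]

-- B's piece for one enumerated part, as a (0- or 1-element) list of pieces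
def pvPieceB (ti : List String) (n : Nat) (ip : Int × List Char) : List (List Char) :=
  let m := pvFirstMatch (PySem.List.sorted ti (fun s => PySem.Str.len s) true) ip.2
  if m = "" ∨ pvIngToDelete.any (fun d => PySem.Chars.isIn d.toList m.toList) then []
  else [if ip.1 ≠ (n : Int) - 1 then PySem.Chars.lstrip m.toList ++ [','] else PySem.Chars.strip m.toList]

theorem ingredients_clean_eq (x : String) (ti : List String) :
    ingredients_clean x ti = ingredients_clean_alt x ti := by
  unfold ingredients_clean ingredients_clean_alt
  set parts := PySem.Chars.splitOn x.toList [','] with hparts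
  set n := parts.length with hn
  have hA : (List.range n).foldl (fun l i => pvStepA ti n (parts.getD i []) l i) [] =
      (List.range n).flatMap (fun i => pvContrib ti n i (parts.getD i [])) := by
    rw [List.foldl_ext (fun l i => pvStepA ti n (parts.getD i []) l i)
      (fun l i => l ++ pvContrib ti n i (parts.getD i [])) []
      (fun a b _ => pv_stepA_eq ti n (parts.getD b []) a b)]
    rw [PySem.List.foldl_append_eq_flatMap, List.nil_append]
  have hB : PySem.Chars.join []
      ((PySem.List.enumerate parts).foldl
        (pvStepB (PySem.List.sorted ti (fun s => PySem.Str.len s) true) n) []) =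
      (List.range n).flatMap (fun i => pvContrib ti n i (parts.getD i [])) := by
    rw [List.foldl_ext (pvStepB (PySem.List.sorted ti (fun s => PySem.Str.len s) true) n)
      (fun ps ip => ps ++ pvPieceB ti n ip) []
      (fun a b _ => pv_stepB_eq (PySem.List.sorted ti (fun s => PySem.Str.len s) true) n a b)]
    rw [PySem.List.foldl_append_eq_flatMap, List.nil_append]
    rw [pv_join_nil_eq_flatten, pv_flatten_flatMap]
    rw [PySem.List.enumerate_eq_map_pyRange parts []]
    have hlen : PySem.List.len parts = (n : Int) := by simp [PySem.List.len, hn]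
    rw [hlen, PySem.List.pyRange_zero_natCast]
    rw [List.flatMap_map, List.flatMap_map]
    apply List.flatMap_congr
    intro i hi
    have hi' : i < n := List.mem_range.mp hi
    rw [PySem.List.pyGetD_natCast]
    exact (pv_contrib_eq ti n i hi' (parts.getD i [])).symm
  exact pv_final _ _ (hA.trans hB.symm)

-- ===== VERDICT (by name: the statement is the Claim_ definition above) =====
theorem ingredients_clean_spec : Claim_equal_ingredients_clean := by
  intro x ti _
  show _ = _
  exact ingredients_clean_eq x ti
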